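-- pv_equiv track=rewrite | github.com/johnHostetter/manim-timeline | animations/demos/graph_example.py | get_vertices_and_edges_for_dnn
-- ===== SOURCE A (Python) =====
-- from typing import Tuple, Set, Dict as DictType, List as ListType, Union as UnionType
--
-- def get_vertices_and_edges_for_dnn(
--     input_size: int = 4, hidden_size: int = 16, output_size: int = 1
-- ) -> Tuple[DictType[str, int], Set[Tuple[str, str]]]:
--     vs = {}
--     all_vertices = []
--
--     all_vertices.extend(
--         [f"V{i}" for i in range(0, input_size)]
--     )  # layer 1: 4-inputs
--     all_vertices.extend([f"P{i}" for i in range(0, hidden_size)])  # layer 2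
--     all_vertices.extend([f"R{i}" for i in range(0, hidden_size)])  # layer 3
--     all_vertices.extend([f"C{i}" for i in range(0, hidden_size)])  # layer 4
--     all_vertices.extend(
--         [f"O{i}" for i in range(0, output_size)]
--     )  # layer 5: 1-output
--
--     for vertex in all_vertices:
--         vs[vertex] = int(vertex[1:])
--
--     edges = set()
--     for i in range(input_size):
--         for j in range(hidden_size):
--             edges.add((f"V{i}", f"P{j}"))
--     for i in range(hidden_size):
--         for j in range(hidden_size):
--             edges.add((f"P{i}", f"R{j}"))
--     for i in range(hidden_size):
--         for j in range(hidden_size):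
--             edges.add((f"R{i}", f"C{j}"))
--     for i in range(hidden_size):
--         for j in range(output_size):
--             edges.add((f"C{i}", f"O{j}"))
--     return vs, edges
-- ===== SOURCE B (Python) =====
-- def get_vertices_and_edges_for_dnn(input_size=4, hidden_size=16, output_size=1):
--     # Single recursive pass over the layer list carrying the previous layer's
--     # names: each step names its layer, records the indices in vs, and wires
--     # the full bipartite block prev x cur -- no staged vertex/edge passes and
--     # no re-parsing of the numeric suffix.
--     def grow(layers, prev, vs, edges):
--         if not layers:
--             return vs, edges
--         (prefix, size), rest = layers[0], layers[1:]
--         cur = []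
--         for i in range(size):
--             name = prefix + str(i)
--             vs[name] = i
--             cur.append(name)
--         for u in prev:
--             for v in cur:
--                 edges.add((u, v))
--         return grow(rest, cur, vs, edges)
--
--     layers = [
--         ("V", input_size),
--         ("P", hidden_size),
--         ("R", hidden_size),
--         ("C", hidden_size),
--         ("O", output_size),
--     ]
--     return grow(layers, [], {}, set())
-- ===== Notes on version B (the rewrite author's own statement) =====
-- stated objective: alternative
-- what changed: B replaces A's staged passes (build all vertex names, then re-parse each suffix with int(vertex[1:]) to fill vs, then four copy-pasted doubly-nested edge loops) by one recursive pass over a layer list that carries the previous layer's names as an accumulator: each recursive step names its layer, records the indices directly, and wires prev x cur, so the suffix re-parsing and the separate edge stage disappear.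
import Mathlib
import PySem

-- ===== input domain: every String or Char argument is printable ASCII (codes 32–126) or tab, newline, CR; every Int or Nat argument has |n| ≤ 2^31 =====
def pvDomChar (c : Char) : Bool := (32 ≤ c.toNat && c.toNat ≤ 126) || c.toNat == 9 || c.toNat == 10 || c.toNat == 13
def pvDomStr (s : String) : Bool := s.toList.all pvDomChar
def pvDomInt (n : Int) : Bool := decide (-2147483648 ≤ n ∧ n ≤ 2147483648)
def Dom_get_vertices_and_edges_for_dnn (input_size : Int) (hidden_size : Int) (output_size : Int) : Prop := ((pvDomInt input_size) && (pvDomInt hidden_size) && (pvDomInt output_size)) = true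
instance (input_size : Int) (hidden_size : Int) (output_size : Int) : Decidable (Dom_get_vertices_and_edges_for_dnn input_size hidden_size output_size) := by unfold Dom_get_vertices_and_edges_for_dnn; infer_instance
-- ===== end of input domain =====

-- B replaces A's staged passes (name everything, re-parse suffixes into vs, four edge loops) by one
-- recursive pass over the layer list carrying the previous layer's names (objective: alternative).

-- ===== PORT A =====
-- f"V{i}" is one ASCII character followed by str(i): ported exactly as String.ofList ('V' :: PySem.Int.toChars i).
def get_vertices_and_edges_for_dnn (input_size : Int) (hidden_size : Int) (output_size : Int) : (List (String × Int)) × (List (String × String)) :=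
  let all_vertices : List String :=
    (((([] ++ (PySem.List.pyRange 0 input_size 1).map (fun i => String.ofList ('V' :: PySem.Int.toChars i)))
      ++ (PySem.List.pyRange 0 hidden_size 1).map (fun i => String.ofList ('P' :: PySem.Int.toChars i)))
      ++ (PySem.List.pyRange 0 hidden_size 1).map (fun i => String.ofList ('R' :: PySem.Int.toChars i)))
      ++ (PySem.List.pyRange 0 hidden_size 1).map (fun i => String.ofList ('C' :: PySem.Int.toChars i)))
      ++ (PySem.List.pyRange 0 output_size 1).map (fun i => String.ofList ('O' :: PySem.Int.toChars i))
  -- int(vertex[1:]) never raises here (the slice is always a decimal numeral); .getD 0 is the total form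
  let vs : PySem.Dict String Int :=
    all_vertices.foldl (fun d vertex =>
      d.insert vertex ((PySem.Int.ofStr? (PySem.Str.slice vertex (some 1) none)).getD 0)) PySem.Dict.empty
  let edges0 : PySem.Set (String × String) := PySem.Set.empty
  let edges1 := (PySem.List.pyRange 0 input_size 1).foldl (fun s i =>
    (PySem.List.pyRange 0 hidden_size 1).foldl (fun s j =>
      PySem.Set.add s (String.ofList ('V' :: PySem.Int.toChars i), String.ofList ('P' :: PySem.Int.toChars j))) s) edges0
  let edges2 := (PySem.List.pyRange 0 hidden_size 1).foldl (fun s i =>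
    (PySem.List.pyRange 0 hidden_size 1).foldl (fun s j =>
      PySem.Set.add s (String.ofList ('P' :: PySem.Int.toChars i), String.ofList ('R' :: PySem.Int.toChars j))) s) edges1
  let edges3 := (PySem.List.pyRange 0 hidden_size 1).foldl (fun s i =>
    (PySem.List.pyRange 0 hidden_size 1).foldl (fun s j =>
      PySem.Set.add s (String.ofList ('R' :: PySem.Int.toChars i), String.ofList ('C' :: PySem.Int.toChars j))) s) edges2
  let edges4 := (PySem.List.pyRange 0 hidden_size 1).foldl (fun s i =>
    (PySem.List.pyRange 0 output_size 1).foldl (fun s j =>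
      PySem.Set.add s (String.ofList ('C' :: PySem.Int.toChars i), String.ofList ('O' :: PySem.Int.toChars j))) s) edges3
  (vs.items, edges4)

-- ===== PORT B =====
-- B's recursive helper `grow`: one pass over the layer list; prev carries the previous layer's names.
-- The inner `for i in range(size)` loop builds cur and fills vs in one fold over a pair state;
-- prefix + str(i) is ported exactly as String.ofList (prefix.toList ++ PySem.Int.toChars i).
def pvGrow : List (String × Int) → List String → PySem.Dict String Int → PySem.Set (String × String) → (List (String × Int)) × (List (String × String))
  | [], _, vs, edges => (vs.items, edges)
  | (prefix_, size) :: rest, prev, vs, edges =>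
    let st := (PySem.List.pyRange 0 size 1).foldl
      (fun (st : List String × PySem.Dict String Int) i =>
        (st.1 ++ [String.ofList (prefix_.toList ++ PySem.Int.toChars i)],
         st.2.insert (String.ofList (prefix_.toList ++ PySem.Int.toChars i)) i)) ([], vs)
    let edges := prev.foldl (fun s u => st.1.foldl (fun s v => PySem.Set.add s (u, v)) s) edges
    pvGrow rest st.1 st.2 edges

def get_vertices_and_edges_for_dnn_alt (input_size : Int) (hidden_size : Int) (output_size : Int) : (List (String × Int)) × (List (String × String)) :=
  pvGrow [("V", input_size), ("P", hidden_size), ("R", hidden_size), ("C", hidden_size), ("O", output_size)]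
    [] PySem.Dict.empty PySem.Set.empty

-- ===== PRECONDITION & SPEC =====
def Spec_get_vertices_and_edges_for_dnn (input_size : Int) (hidden_size : Int) (output_size : Int) (out : (List (String × Int)) × (List (String × String))) : Prop := out = get_vertices_and_edges_for_dnn_alt input_size hidden_size output_size
instance (input_size : Int) (hidden_size : Int) (output_size : Int) (out : (List (String × Int)) × (List (String × String))) : Decidable (Spec_get_vertices_and_edges_for_dnn input_size hidden_size output_size out) := by unfold Spec_get_vertices_and_edges_for_dnn; infer_instance

-- ===== CLAIM (what is proved, stated in full; the proofs are below) =====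
def Claim_equal_get_vertices_and_edges_for_dnn : Prop := ∀ (input_size : Int) (hidden_size : Int) (output_size : Int), Dom_get_vertices_and_edges_for_dnn input_size hidden_size output_size → Spec_get_vertices_and_edges_for_dnn input_size hidden_size output_size (get_vertices_and_edges_for_dnn input_size hidden_size output_size)

-- ===== LEMMAS AND PROOFS =====

-- `PySem.Int.ofChars?` delegates digit parsing to a private helper; the helper and its defining
-- equations are captured here by unification (all three components hold by `rfl`).
theorem pvCapture :
  ∃ (go : List Char → Bool → Nat → Option Nat),
    (∀ s : List Char, PySem.Int.ofChars? s =
      (match (List.dropWhile PySem.Int.isIntSpace (List.dropWhile PySem.Int.isIntSpace s).reverse).reverse with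
       | '-' :: ds => Option.map (fun n => -n)
           (do let a ← (match ds with | [] => none | ds' => go ds' false 0); pure (a : Int))
       | '+' :: ds => Option.map (fun n => n)
           (do let a ← (match ds with | [] => none | ds' => go ds' false 0); pure (a : Int))
       | ds => Option.map (fun n => n)
           (do let a ← (match ds with | [] => none | ds' => go ds' false 0); pure (a : Int)))) ∧
    (∀ (aft : Bool) (acc : Nat), go [] aft acc = if aft = true then some acc else none) ∧
    (∀ (c : Char) (rest : List Char) (aft : Bool) (acc : Nat), go (c :: rest) aft acc =
       if c.isDigit = true then go rest true (acc * 10 + (c.toNat - '0'.toNat))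
       else if c = '_' ∧ aft = true then
         (match rest with
          | d :: _ => if d.isDigit = true then go rest false acc else none
          | [] => none)
       else none) := by
  refine ⟨_, fun s => rfl, ?h3, ?h4⟩
  case h3 => exact fun aft acc => rfl
  case h4 => exact fun c rest aft acc => rfl

-- the digit list of n in base 10, most significant first (mirrors Nat.toDigitsCore)
def pvRep (n : Nat) : List Char :=
  if n < 10 then [Nat.digitChar n] else pvRep (n / 10) ++ [Nat.digitChar (n % 10)]
decreasing_by exact Nat.div_lt_self (by omega) (by omega)

theorem pvRep_lt {n : Nat} (h : n < 10) : pvRep n = [Nat.digitChar n] := by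
  rw [pvRep]; simp [h]

theorem pvRep_ge {n : Nat} (h : ¬ n < 10) : pvRep n = pvRep (n / 10) ++ [Nat.digitChar (n % 10)] := by
  rw [pvRep]; simp [h]

theorem pvDigitChar_isDigit {m : Nat} (h : m < 10) : (Nat.digitChar m).isDigit = true := by
  interval_cases m <;> decide

theorem pvDigitChar_val {m : Nat} (h : m < 10) : (Nat.digitChar m).toNat - '0'.toNat = m := by
  interval_cases m <;> decide

theorem pvRep_digits (n : Nat) : ∀ c ∈ pvRep n, c.isDigit = true := by
  induction n using Nat.strong_induction_on with
  | _ n ih =>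
    by_cases h : n < 10
    · rw [pvRep_lt h]; intro c hc
      simp at hc; subst hc; exact pvDigitChar_isDigit h
    · rw [pvRep_ge h]; intro c hc
      rcases List.mem_append.mp hc with hc | hc
      · exact ih (n / 10) (Nat.div_lt_self (by omega) (by omega)) c hc
      · simp at hc; subst hc; exact pvDigitChar_isDigit (Nat.mod_lt _ (by omega))

theorem pvRep_ne_nil (n : Nat) : pvRep n ≠ [] := by
  by_cases h : n < 10
  · rw [pvRep_lt h]; simp
  · rw [pvRep_ge h]; simp

theorem pvToDigitsCore_eq (fuel : Nat) : ∀ (n : Nat) (ds : List Char), n < fuel →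
    Nat.toDigitsCore 10 fuel n ds = pvRep n ++ ds := by
  induction fuel with
  | zero => intro n ds h; omega
  | succ f ih =>
    intro n ds h
    rw [Nat.toDigitsCore]
    by_cases h0 : n / 10 = 0
    · have hn : n < 10 := by omega
      simp only [h0, if_true]
      rw [pvRep_lt hn, Nat.mod_eq_of_lt hn]
      simp
    · simp only [h0, if_false]
      have hge : ¬ n < 10 := by omega
      have hlt : n / 10 < f := by
        have hx : n / 10 < n := Nat.div_lt_self (by omega) (by omega)
        omega
      rw [ih (n / 10) _ hlt]
      conv_rhs => rw [pvRep_ge hge]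
      simp

theorem pvToDigits_eq (n : Nat) : Nat.toDigits 10 n = pvRep n := by
  show Nat.toDigitsCore 10 (n + 1) n [] = pvRep n
  rw [pvToDigitsCore_eq (n + 1) n [] (by omega)]
  simp

theorem pvRep_foldl (n : Nat) : ∀ acc : Nat,
    (pvRep n).foldl (fun a c => a * 10 + (c.toNat - '0'.toNat)) acc
      = acc * 10 ^ (pvRep n).length + n := by
  induction n using Nat.strong_induction_on with
  | _ n ih =>
    intro acc
    by_cases h : n < 10
    · rw [pvRep_lt h]
      simp only [List.foldl_cons, List.foldl_nil, List.length_singleton, pow_one]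
      rw [pvDigitChar_val h]
    · rw [pvRep_ge h]
      rw [List.foldl_append, ih (n / 10) (Nat.div_lt_self (by omega) (by omega)) acc]
      simp only [List.foldl, List.length_append, List.length_singleton]
      rw [pvDigitChar_val (Nat.mod_lt _ (by omega))]
      have hn : n = 10 * (n / 10) + n % 10 := (Nat.div_add_mod n 10).symm
      rw [pow_succ]
      set p := 10 ^ (pvRep (n / 10)).length
      set q := n / 10
      set r := n % 10
      calc (acc * p + q) * 10 + r = acc * (p * 10) + (10 * q + r) := by ring
        _ = acc * (p * 10) + n := by omega

theorem pvNotSpace {c : Char} (h : c.isDigit = true) : PySem.Int.isIntSpace c = false := by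
  have hb : 48 ≤ c.toNat ∧ c.toNat ≤ 57 := by
    simp [Char.isDigit] at h
    exact ⟨h.1, h.2⟩
  unfold PySem.Int.isIntSpace
  have : c ≠ ' ' ∧ c ≠ '\t' ∧ c ≠ '\n' ∧ c ≠ '\r' ∧ c ≠ '\x0b' ∧ c ≠ '\x0c' := by
    refine ⟨?_, ?_, ?_, ?_, ?_, ?_⟩ <;> (intro he; subst he; simp [Char.toNat] at hb)
  simp_all

theorem pvDropWhile_digits {ds : List Char} (h : ∀ c ∈ ds, c.isDigit = true) :
    List.dropWhile PySem.Int.isIntSpace ds = ds := by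
  cases ds with
  | nil => rfl
  | cons c rest =>
    rw [List.dropWhile_cons]
    simp [pvNotSpace (h c (by simp))]

theorem pvOfChars_toDigits (n : Nat) :
    PySem.Int.ofChars? (Nat.toDigits 10 n) = some (n : Int) := by
  obtain ⟨go, hof, hnil, hcons⟩ := pvCapture
  have hgo : ∀ (ds : List Char) (acc : Nat), (∀ c ∈ ds, c.isDigit = true) →
      go ds true acc = some (ds.foldl (fun a c => a * 10 + (c.toNat - '0'.toNat)) acc) := by
    intro ds
    induction ds with
    | nil => intro acc _; rw [hnil]; simp
    | cons c rest ih =>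
      intro acc hd
      rw [hcons, if_pos (hd c (by simp))]
      exact ih _ (fun x hx => hd x (by simp [hx]))
  have hd : ∀ c ∈ Nat.toDigits 10 n, c.isDigit = true := by
    rw [pvToDigits_eq]; exact pvRep_digits n
  have hdrev : ∀ c ∈ (Nat.toDigits 10 n).reverse, c.isDigit = true := by
    intro c hc; exact hd c (List.mem_reverse.mp hc)
  rw [hof, pvDropWhile_digits hd, pvDropWhile_digits hdrev, List.reverse_reverse]
  rcases hds : Nat.toDigits 10 n with _ | ⟨c, rest⟩
  · exact absurd (pvToDigits_eq n ▸ hds) (pvRep_ne_nil n)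
  · have hcd : c.isDigit = true := hd c (by rw [hds]; simp)
    have hrd : ∀ x ∈ rest, x.isDigit = true := fun x hx => hd x (by rw [hds]; simp [hx])
    split
    · next ds heq =>
      exfalso
      have : c = '-' := by injection heq.symm with h1 _; exact h1.symm
      subst this; simp [Char.isDigit] at hcd
    · next ds heq =>
      exfalso
      have : c = '+' := by injection heq.symm with h1 _; exact h1.symm
      subst this; simp [Char.isDigit] at hcd
    · next ds hne1 hne2 =>
      have hval : go (c :: rest) false 0 = some ((c :: rest).foldl (fun a c => a * 10 + (c.toNat - '0'.toNat)) 0) := by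
        rw [hcons, if_pos hcd, List.foldl_cons]
        exact hgo rest _ hrd
      have hfold : (c :: rest).foldl (fun a c => a * 10 + (c.toNat - '0'.toNat)) 0 = n := by
        rw [← hds, pvToDigits_eq, pvRep_foldl n 0]
        simp
      simp only [hval, hfold]
      simp

-- the value A stores in the dict: int(("p" + str(i))[1:]) = i for 0 ≤ i
theorem pvParse_eq (p : Char) (i : Int) (hi : 0 ≤ i) :
    (PySem.Int.ofStr? (PySem.Str.slice (String.ofList (p :: PySem.Int.toChars i)) (some 1) none)).getD 0 = i := by
  have h1 : (PySem.Str.slice (String.ofList (p :: PySem.Int.toChars i)) (some 1) none).toList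
      = PySem.Int.toChars i := by
    simp [PySem.List.slice_from_one]
  rw [PySem.Int.ofStr?]
  rw [show ∀ s : String, PySem.Int.ofChars? s.toList = PySem.Int.ofChars? s.toList from fun _ => rfl]
  rw [h1]
  have h2 : PySem.Int.toChars i = Nat.toDigits 10 i.toNat := by
    unfold PySem.Int.toChars
    rw [if_neg (by omega)]
  rw [h2, pvOfChars_toDigits]
  simp [Int.toNat_of_nonneg hi]

-- one vertex layer of A: the insert loop with the re-parsed value equals the insert loop with i itself
theorem pvLayer_eq (p : Char) (n : Int) (d : PySem.Dict String Int) :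
    (PySem.List.pyRange 0 n 1).foldl (fun d i =>
        d.insert (String.ofList (p :: PySem.Int.toChars i))
          ((PySem.Int.ofStr? (PySem.Str.slice (String.ofList (p :: PySem.Int.toChars i)) (some 1) none)).getD 0)) d
    = (PySem.List.pyRange 0 n 1).foldl (fun d i =>
        d.insert (String.ofList (p :: PySem.Int.toChars i)) i) d := by
  apply PySem.List.foldl_congr_mem
  intro acc i hi
  rw [pvParse_eq p i (PySem.List.mem_pyRange_one.mp hi).1]

-- B's paired fold splits: first component is the name list, second the dict fold
theorem pvStep (name : Int → String) (l : List Int) : ∀ (cs : List String) (d : PySem.Dict String Int),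
    l.foldl (fun (st : List String × PySem.Dict String Int) i =>
        (st.1 ++ [name i], st.2.insert (name i) i)) (cs, d)
    = (cs ++ l.map name, l.foldl (fun d i => d.insert (name i) i) d) := by
  induction l with
  | nil => intro cs d; simp
  | cons x xs ih =>
    intro cs d
    simp only [List.foldl_cons, List.map_cons, ih, List.append_assoc, List.cons_append,
      List.nil_append]

-- ===== VERDICT (by name: the statement is the Claim_ definition above) =====
theorem get_vertices_and_edges_for_dnn_spec : Claim_equal_get_vertices_and_edges_for_dnn := by
  intro input_size hidden_size output_size _
  unfold Spec_get_vertices_and_edges_for_dnn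
  unfold get_vertices_and_edges_for_dnn get_vertices_and_edges_for_dnn_alt
  have hV : ("V" : String).toList = ['V'] := rfl
  have hP : ("P" : String).toList = ['P'] := rfl
  have hR : ("R" : String).toList = ['R'] := rfl
  have hC : ("C" : String).toList = ['C'] := rfl
  have hO : ("O" : String).toList = ['O'] := rfl
  simp only [pvGrow, pvStep, hV, hP, hR, hC, hO, List.cons_append, List.nil_append,
    List.foldl_append, List.foldl_map, List.foldl_nil]
  rw [pvLayer_eq, pvLayer_eq, pvLayer_eq, pvLayer_eq, pvLayer_eq]
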